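-- pv_equiv track=rewrite | github.com/Vignesh-1101/DSA-PYTHON | Python/sorting1.py | movetwos
-- ===== SOURCE A (Python) =====
-- from collections import deque
--
-- def movetwos(nums):
--       stack = deque()
--       for i in range(len(nums)):
--           if nums[i] == 2:
--               stack.append(nums[i])
--           else:
--               stack.appendleft(nums[i])
--       return " ".join(str(i) for i in stack)
-- ===== SOURCE B (Python) =====
-- def movetwos(nums):
--     rest = [x for x in reversed(nums) if x != 2]
--     twos = [x for x in nums if x == 2]
--     return " ".join(str(x) for x in rest + twos)
-- ===== Notes on version B (the rewrite author's own statement) =====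
-- stated objective: simpler
-- what changed: Replaces the online deque pass (appendleft for non-2s, append for 2s) with two list comprehensions: non-2 elements filtered from reversed(nums) plus the 2s filtered in order, then concatenated and joined.
import Mathlib
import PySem

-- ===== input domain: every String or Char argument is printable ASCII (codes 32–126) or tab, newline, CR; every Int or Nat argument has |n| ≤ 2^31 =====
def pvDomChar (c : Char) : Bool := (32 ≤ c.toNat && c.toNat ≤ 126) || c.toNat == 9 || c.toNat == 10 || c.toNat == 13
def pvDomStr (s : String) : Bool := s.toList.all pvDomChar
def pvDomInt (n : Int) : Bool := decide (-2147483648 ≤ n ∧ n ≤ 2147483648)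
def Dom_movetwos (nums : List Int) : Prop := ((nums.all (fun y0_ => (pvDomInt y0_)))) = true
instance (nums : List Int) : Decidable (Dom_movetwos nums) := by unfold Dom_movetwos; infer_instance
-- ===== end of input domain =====

-- B replaces A's single deque pass with two filter passes (reversed non-2s ++ 2s); simpler, same order.
-- ===== PORT A =====
-- deque: appendleft = cons to front, append = snoc at end
def movetwos (nums : List Int) : String :=
  let stack := nums.foldl (fun st x => if x == 2 then st ++ [x] else x :: st) []
  PySem.Str.join " " (stack.map PySem.Int.toStr)

-- ===== PORT B =====
def movetwos_alt (nums : List Int) : String :=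
  let rest := nums.reverse.filter (fun x => !(x == 2))
  let twos := nums.filter (fun x => x == 2)
  PySem.Str.join " " ((rest ++ twos).map PySem.Int.toStr)

-- ===== PRECONDITION & SPEC =====
def Spec_movetwos (nums : List Int) (out : String) : Prop := out = movetwos_alt nums
instance (nums : List Int) (out : String) : Decidable (Spec_movetwos nums out) := by unfold Spec_movetwos; infer_instance

-- ===== CLAIM (what is proved, stated in full; the proofs are below) =====
def Claim_equal_movetwos : Prop := ∀ (nums : List Int), Dom_movetwos nums → Spec_movetwos nums (movetwos nums)

-- ===== LEMMAS AND PROOFS =====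

-- ===== VERDICT (by name: the statement is the Claim_ definition above) =====
theorem movetwos_stack (nums : List Int) (st : List Int) :
    nums.foldl (fun st x => if x == 2 then st ++ [x] else x :: st) st
      = (nums.filter (fun x => !(x == 2))).reverse ++ st ++ nums.filter (fun x => x == 2) := by
  induction nums generalizing st with
  | nil => simp
  | cons x xs ih =>
    rw [List.foldl_cons, ih]
    by_cases h : x = 2 <;> simp [h]

theorem movetwos_spec : Claim_equal_movetwos := by
  intro nums _
  unfold Spec_movetwos movetwos movetwos_alt
  rw [movetwos_stack]
  simp [List.filter_reverse]
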